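-- pv_equiv track=rewrite | github.com/maxwellcross-labs/30-days-red-team-toolkit | 05-persistence/windows_persistence_tools/rt_wmi_persistence/detection/scanner.py | parse_consumer_output
-- ===== SOURCE A (Python) =====
-- def parse_consumer_output(output):
--     """Parse consumer enumeration output"""
--     consumers = []
--     current_consumer = {}
--
--     for line in output.split('\n'):
--         line = line.strip()
--
--         if line.startswith('Name'):
--             if current_consumer:
--                 consumers.append(current_consumer)
--             current_consumer = {'name': line.split(':', 1)[1].strip() if ':' in line else ''}
--         elif line.startswith('CommandLineTemplate'):
--             current_consumer['command'] = line.split(':', 1)[1].strip() if ':' in line else ''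
--
--     if current_consumer:
--         consumers.append(current_consumer)
--
--     return consumers
-- ===== SOURCE B (Python) =====
-- def parse_consumer_output(output):
--     """Parse consumer enumeration output"""
--     lines = [raw.strip() for raw in output.split('\n')]
--     # Phase 1: segment lines into groups, starting a fresh group at each 'Name' line.
--     groups = []
--     current = []
--     for line in lines:
--         if line.startswith('Name'):
--             groups.append(current)
--             current = [line]
--         else:
--             current.append(line)
--     groups.append(current)
--     # Phase 2: build a dict per group; keep the non-empty ones.
--     result = []
--     for group in groups:
--         entry = {}
--         for line in group:
--             if line.startswith('Name'):
--                 entry['name'] = line.split(':', 1)[1].strip() if ':' in line else ''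
--             elif line.startswith('CommandLineTemplate'):
--                 entry['command'] = line.split(':', 1)[1].strip() if ':' in line else ''
--         if entry:
--             result.append(entry)
--     return result
-- ===== Notes on version B (the rewrite author's own statement) =====
-- stated objective: alternative
-- what changed: A's single fused loop with a flush-on-Name dict accumulator is replaced by a two-phase pass: strip and segment the lines into groups at each name-header line, then build one dict per group and keep the non-empty ones.
import Mathlib
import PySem

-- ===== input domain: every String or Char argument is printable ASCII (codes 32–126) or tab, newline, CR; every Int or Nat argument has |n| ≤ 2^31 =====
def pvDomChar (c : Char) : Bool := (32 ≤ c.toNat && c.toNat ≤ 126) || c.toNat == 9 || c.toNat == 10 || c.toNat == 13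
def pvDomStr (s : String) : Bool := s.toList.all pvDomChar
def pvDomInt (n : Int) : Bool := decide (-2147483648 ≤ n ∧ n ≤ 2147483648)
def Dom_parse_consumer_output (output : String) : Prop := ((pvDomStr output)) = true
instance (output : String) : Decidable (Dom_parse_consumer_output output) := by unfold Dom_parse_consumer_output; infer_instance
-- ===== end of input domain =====

-- B replaces A's single fused accumulator loop by a two-phase pass (segment the stripped
-- lines into groups at each 'Name' line, then build one dict per group and keep the
-- non-empty ones); objective: alternative decomposition, same cost.

-- ===== PORT A =====

-- line.split(':', 1)[1].strip() if ':' in line else ''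
def aColonVal (line : String) : String :=
  if PySem.Str.isIn ":" line then
    PySem.Str.strip (((PySem.Str.splitMax? line ":" 1).getD []).getD 1 "")
  else ""

-- the body of A's for-loop; state = (consumers, current_consumer)
def aStep (st : List (PySem.Dict String String) × PySem.Dict String String) (rawline : String) :
    List (PySem.Dict String String) × PySem.Dict String String :=
  let line := PySem.Str.strip rawline
  if PySem.Str.startswith line "Name" then
    ((if st.2.items.isEmpty then st.1 else st.1 ++ [st.2]),
     PySem.Dict.empty.insert "name" (aColonVal line))
  else if PySem.Str.startswith line "CommandLineTemplate" then
    (st.1, st.2.insert "command" (aColonVal line))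
  else st

def parse_consumer_output (output : String) : List (List (String × String)) :=
  let st := ((PySem.Str.split? output "\n").getD []).foldl aStep ([], PySem.Dict.empty)
  let consumers := if st.2.items.isEmpty then st.1 else st.1 ++ [st.2]
  consumers.map (fun d => d.items)

-- ===== PORT B =====

-- same expression as in A: line.split(':', 1)[1].strip() if ':' in line else ''
def bColonVal (line : String) : String :=
  if PySem.Str.isIn ":" line then
    PySem.Str.strip (((PySem.Str.splitMax? line ":" 1).getD []).getD 1 "")
  else ""

-- phase-1 loop body; state = (groups, current)
def bGroupStep (st : List (List String) × List String) (line : String) :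
    List (List String) × List String :=
  if PySem.Str.startswith line "Name" then (st.1 ++ [st.2], [line])
  else (st.1, st.2 ++ [line])

-- phase-2 inner loop body: build the group's dict
def bDictStep (d : PySem.Dict String String) (line : String) : PySem.Dict String String :=
  if PySem.Str.startswith line "Name" then d.insert "name" (bColonVal line)
  else if PySem.Str.startswith line "CommandLineTemplate" then d.insert "command" (bColonVal line)
  else d

def bDictOf (group : List String) : PySem.Dict String String :=
  group.foldl bDictStep PySem.Dict.empty

def parse_consumer_output_alt (output : String) : List (List (String × String)) :=
  let lines := ((PySem.Str.split? output "\n").getD []).map PySem.Str.strip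
  let st := lines.foldl bGroupStep ([], [])
  let groups := st.1 ++ [st.2]
  (((groups.map bDictOf).filter (fun d => !d.items.isEmpty)).map (fun d => d.items))

-- ===== PRECONDITION & SPEC =====
def Spec_parse_consumer_output (output : String) (out : List (List (String × String))) : Prop := out = parse_consumer_output_alt output
instance (output : String) (out : List (List (String × String))) : Decidable (Spec_parse_consumer_output output out) := by unfold Spec_parse_consumer_output; infer_instance

-- ===== CLAIM (what is proved, stated in full; the proofs are below) =====
def Claim_equal_parse_consumer_output : Prop := ∀ (output : String), Dom_parse_consumer_output output → Spec_parse_consumer_output output (parse_consumer_output output)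

-- ===== LEMMAS AND PROOFS =====

-- shorthand for the two prefixes on the Chars side (simp normal form of the ports' tests)
def nmChars : List Char := ['N','a','m','e']
def cltChars : List Char := ['C','o','m','m','a','n','d','L','i','n','e','T','e','m','p','l','a','t','e']

-- B's grouping fold, as a structural recursion (proof-side restatement)
def gather : List String → List String → List (List String)
  | [], g => [g]
  | l :: ls, g =>
    if PySem.Str.startswith l "Name" then g :: gather ls [l] else gather ls (g ++ [l])

lemma bGroupStep_name (l : String) (h : PySem.Chars.startswith l.toList nmChars = true)
    (st : List (List String) × List String) : bGroupStep st l = (st.1 ++ [st.2], [l]) := by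
  simp [bGroupStep, nmChars] at h ⊢; simp [h]

lemma bGroupStep_other (l : String) (h : PySem.Chars.startswith l.toList nmChars = false)
    (st : List (List String) × List String) : bGroupStep st l = (st.1, st.2 ++ [l]) := by
  simp [bGroupStep, nmChars] at h ⊢; simp [h]

lemma gather_name (l : String) (ls : List String) (g : List String)
    (h : PySem.Chars.startswith l.toList nmChars = true) :
    gather (l :: ls) g = g :: gather ls [l] := by
  simp [gather, nmChars] at h ⊢; simp [h]

lemma gather_other (l : String) (ls : List String) (g : List String)
    (h : PySem.Chars.startswith l.toList nmChars = false) :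
    gather (l :: ls) g = gather ls (g ++ [l]) := by
  simp [gather, nmChars] at h ⊢; simp [h]

lemma gather_eq_foldl (ls : List String) (gs : List (List String)) (g : List String) :
    (ls.foldl bGroupStep (gs, g)).1 ++ [(ls.foldl bGroupStep (gs, g)).2] = gs ++ gather ls g := by
  induction ls generalizing gs g with
  | nil => simp [gather]
  | cons l ls ih =>
    rw [List.foldl_cons]
    cases h : PySem.Chars.startswith l.toList nmChars with
    | true => rw [bGroupStep_name l h, gather_name l ls g h, ih]; simp
    | false => rw [bGroupStep_other l h, gather_other l ls g h, ih]

lemma bDictOf_append_singleton (g : List String) (l : String) :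
    bDictOf (g ++ [l]) = bDictStep (bDictOf g) l := by
  simp [bDictOf]

-- A's loop body with the strip already applied (A strips inside the loop; B strips in phase 1)
def aStep' (st : List (PySem.Dict String String) × PySem.Dict String String) (line : String) :
    List (PySem.Dict String String) × PySem.Dict String String :=
  if PySem.Str.startswith line "Name" then
    ((if st.2.items.isEmpty then st.1 else st.1 ++ [st.2]),
     PySem.Dict.empty.insert "name" (aColonVal line))
  else if PySem.Str.startswith line "CommandLineTemplate" then
    (st.1, st.2.insert "command" (aColonVal line))
  else st

lemma foldl_aStep_eq (ls : List String) (st : List (PySem.Dict String String) × PySem.Dict String String) :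
    ls.foldl aStep st = (ls.map PySem.Str.strip).foldl aStep' st := by
  rw [List.foldl_map]; rfl

lemma aStep'_name (l : String) (h : PySem.Chars.startswith l.toList nmChars = true)
    (st : List (PySem.Dict String String) × PySem.Dict String String) :
    aStep' st l = ((if st.2.items.isEmpty then st.1 else st.1 ++ [st.2]), bDictOf [l]) := by
  have hb : bDictOf [l] = PySem.Dict.empty.insert "name" (aColonVal l) := by
    simp [nmChars] at h; simp [bDictOf, bDictStep, aColonVal, bColonVal, h]
  simp [aStep', nmChars] at h ⊢; simp [h, hb]

lemma aStep'_cmd (l : String) (hn : PySem.Chars.startswith l.toList nmChars = false)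
    (hc : PySem.Chars.startswith l.toList cltChars = true)
    (st : List (PySem.Dict String String) × PySem.Dict String String) :
    aStep' st l = (st.1, bDictStep st.2 l) := by
  simp [nmChars] at hn; simp [cltChars] at hc
  simp [aStep', bDictStep, hn, hc, aColonVal, bColonVal]

lemma aStep'_other (l : String) (hn : PySem.Chars.startswith l.toList nmChars = false)
    (hc : PySem.Chars.startswith l.toList cltChars = false)
    (st : List (PySem.Dict String String) × PySem.Dict String String) :
    aStep' st l = st := by
  have hb : bDictStep st.2 l = st.2 := by
    simp [nmChars] at hn; simp [cltChars] at hc; simp [bDictStep, hn, hc]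
  simp [nmChars] at hn; simp [cltChars] at hc; simp [aStep', hn, hc]

lemma bDictStep_skip (l : String) (hn : PySem.Chars.startswith l.toList nmChars = false)
    (hc : PySem.Chars.startswith l.toList cltChars = false) (d : PySem.Dict String String) :
    bDictStep d l = d := by
  simp [nmChars] at hn; simp [cltChars] at hc; simp [bDictStep, hn, hc]

-- the core invariant: A's fused loop over stripped lines, started with current = bDictOf g,
-- produces (after the final flush) exactly "cons" ++ the non-empty dicts of B's groups
lemma main_inv (ls : List String) (cons : List (PySem.Dict String String)) (g : List String) :
    (if (ls.foldl aStep' (cons, bDictOf g)).2.items.isEmpty then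
        (ls.foldl aStep' (cons, bDictOf g)).1
      else (ls.foldl aStep' (cons, bDictOf g)).1 ++ [(ls.foldl aStep' (cons, bDictOf g)).2])
      = cons ++ ((gather ls g).map bDictOf).filter (fun d => !d.items.isEmpty) := by
  induction ls generalizing cons g with
  | nil =>
    simp only [List.foldl_nil, gather, List.map_cons, List.map_nil, List.filter]
    by_cases h : (bDictOf g).items.isEmpty <;> simp [h]
  | cons l ls ih =>
    rw [List.foldl_cons]
    cases h : PySem.Chars.startswith l.toList nmChars with
    | true =>
      rw [aStep'_name l h, gather_name l ls g h, ih]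
      by_cases hg : (bDictOf g).items.isEmpty <;> simp [hg, List.append_assoc]
    | false =>
      cases h2 : PySem.Chars.startswith l.toList cltChars with
      | true =>
        rw [aStep'_cmd l h h2, show bDictStep (bDictOf g) l = bDictOf (g ++ [l]) from
          (bDictOf_append_singleton g l).symm, gather_other l ls g h, ih]
      | false =>
        rw [aStep'_other l h h2, show (cons, bDictOf g) = (cons, bDictOf (g ++ [l])) from by
          rw [bDictOf_append_singleton, bDictStep_skip l h h2], gather_other l ls g h, ih]

-- ===== VERDICT (by name: the statement is the Claim_ definition above) =====
theorem parse_consumer_output_spec : Claim_equal_parse_consumer_output := by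
  intro output _
  unfold Spec_parse_consumer_output parse_consumer_output parse_consumer_output_alt
  simp only [foldl_aStep_eq]
  have hg := gather_eq_foldl (((PySem.Str.split? output "\n").getD []).map PySem.Str.strip) [] []
  have hm := main_inv (((PySem.Str.split? output "\n").getD []).map PySem.Str.strip) [] []
  simp only [bDictOf, List.foldl_nil] at hm
  simp only [List.nil_append] at hg hm
  rw [hm, hg]
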